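-- pv_equiv track=rewrite | github.com/Cleankz/white_whalkers | whalkers.py | white_walkers
-- ===== SOURCE A (Python) =====
-- def white_walkers(village):
--     index = []
--     result= []
--     r = []
--     for i in range(len(village)):
--         if village[i] == "0" or  village[i] == "1" or village[i] == "2" or village[i] == "3" or village[i] == "4" or village[i] == "5" or village[i] == "6" or village[i] == "7" or village[i] == "8" or village[i] == "9":
--             index.append(i)
--     if len(index) <= 1:
--         return False
--     for j in range(len(index)):
--         for x in range(j,len(index)):
--             if j == x:
--                 continue
--             if village.count("=",index[j],index[x]) % 3 == 0 and len(index) == 2: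
--                 r.append(False)
--             elif int(village[index[j]]) + int(village[index[x]]) == 10 and village.count("=",index[j],index[x]) == 3 or village.count("=",index[j],index[x]) % 3 == 0:
--                 r.append( True)
--             elif int(village[index[j]]) + int(village[index[x]]) == 10 and (village.count("=",index[j],index[x])) != 3:
--                 r.append(False)
--     if False in r:
--         return False
--     return True
-- ===== SOURCE B (Python) =====
-- def white_walkers(village):
--     digits = [(i, ord(ch) - 48) for i, ch in enumerate(village) if '0' <= ch <= '9']
--     k = len(digits)
--     if k <= 1:
--         return False
--     prefix = [0]
--     total = 0
--     for ch in village: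
--         total += (ch == '=')
--         prefix.append(total)
--     for j in range(k):
--         pj, vj = digits[j]
--         for x in range(j + 1, k):
--             px, vx = digits[x]
--             c = prefix[px] - prefix[pj]
--             if c % 3 == 0:
--                 if k == 2:
--                     return False
--             elif vj + vx == 10:
--                 return False
--     return True
-- ===== Notes on version B (the rewrite author's own statement) =====
-- stated objective: faster
-- what changed: B precomputes the digit positions with their values in one enumerate pass and a prefix-sum table of equals-sign counts, so each pair test is O(1) instead of A's per-pair village.count rescan, and B exits early on the first failing pair instead of collecting a result list.
import Mathlib
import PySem

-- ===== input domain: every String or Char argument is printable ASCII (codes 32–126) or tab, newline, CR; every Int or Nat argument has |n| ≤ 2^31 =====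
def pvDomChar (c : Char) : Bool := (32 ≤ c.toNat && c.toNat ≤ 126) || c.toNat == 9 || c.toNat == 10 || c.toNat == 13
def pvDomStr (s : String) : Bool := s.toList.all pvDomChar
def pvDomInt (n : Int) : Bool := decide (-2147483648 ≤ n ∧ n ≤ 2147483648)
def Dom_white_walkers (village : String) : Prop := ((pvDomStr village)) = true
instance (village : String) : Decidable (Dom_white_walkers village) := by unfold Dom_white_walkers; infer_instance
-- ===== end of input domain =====

-- B replaces A's per-pair village.count (an O(n) rescan for every pair of digit positions) by a
-- prefix-sum table of equals-sign counts, turning O(k^2 * n) into O(n + k^2); equivalence of return values is proved.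

-- ===== PORT A =====
-- the ten chained 'village[i] == "0" or ...' comparisons, in order
def pvIsDigA (oc : Option Char) : Bool :=
  oc == some '0' || oc == some '1' || oc == some '2' || oc == some '3' || oc == some '4' ||
  oc == some '5' || oc == some '6' || oc == some '7' || oc == some '8' || oc == some '9'

-- village.count("=", a, b): occurrences of "=" in the slice village[a:b]
def pvCntA (cs : List Char) (a b : Int) : Int :=
  (PySem.Chars.count (PySem.List.slice cs (some a) (some b)) ['='] : Int)

-- int(village[i]); i is always an in-range digit position where A evaluates this, so exact there
def pvDigA (cs : List Char) (i : Int) : Int :=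
  ((PySem.List.pyGet? cs i).bind (fun c => PySem.Int.ofChars? [c])).getD 0

-- the inner-loop body: what gets appended to r for the pair (j, x) (nothing, [true] or [false])
def pvBodyA (cs : List Char) (index : List Int) (j x : Int) : List Bool :=
  if j == x then []
  else
    let a := PySem.List.pyGetD index j 0
    let b := PySem.List.pyGetD index x 0
    if PySem.Int.mod (pvCntA cs a b) 3 == 0 && index.length == 2 then [false]
    else if (pvDigA cs a + pvDigA cs b == 10 && pvCntA cs a b == 3) ||
            PySem.Int.mod (pvCntA cs a b) 3 == 0 then [true]
    else if pvDigA cs a + pvDigA cs b == 10 && pvCntA cs a b != 3 then [false]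
    else []

def white_walkers (village : String) : Bool :=
  let cs := village.toList
  let index : List Int :=
    (PySem.List.pyRange 0 (cs.length : Int)).foldl
      (fun idx i => if pvIsDigA (PySem.List.pyGet? cs i) then idx ++ [i] else idx) []
  if index.length ≤ 1 then false
  else
    let r : List Bool :=
      (PySem.List.pyRange 0 (index.length : Int)).foldl
        (fun r j =>
          (PySem.List.pyRange j (index.length : Int)).foldl
            (fun r x => r ++ pvBodyA cs index j x) r) []
    if r.contains false then false else true

-- ===== PORT B =====
def white_walkers_alt (village : String) : Bool :=
  let cs := village.toList
  let digits : List (Int × Int) :=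
    (PySem.List.enumerate cs).filterMap
      (fun p => if '0' ≤ p.2 ∧ p.2 ≤ '9' then some (p.1, (p.2.toNat : Int) - 48) else none)
  let k := digits.length
  if k ≤ 1 then false
  else
    let pt :=
      cs.foldl (fun (pt : List Int × Int) ch =>
        let t := pt.2 + (if ch == '=' then 1 else 0)
        (pt.1 ++ [t], t)) ([0], 0)
    (PySem.List.pyRange 0 (k : Int)).all (fun j =>
      let d := PySem.List.pyGetD digits j (0, 0)
      (PySem.List.pyRange (j + 1) (k : Int)).all (fun x =>
        let e := PySem.List.pyGetD digits x (0, 0)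
        let c := PySem.List.pyGetD pt.1 e.1 0 - PySem.List.pyGetD pt.1 d.1 0
        !(if PySem.Int.mod c 3 == 0 then k == 2 else decide (d.2 + e.2 = 10))))

-- ===== PRECONDITION & SPEC =====
def Spec_white_walkers (village : String) (out : Bool) : Prop := out = white_walkers_alt village
instance (village : String) (out : Bool) : Decidable (Spec_white_walkers village out) := by unfold Spec_white_walkers; infer_instance

-- ===== CLAIM (what is proved, stated in full; the proofs are below) =====
def Claim_equal_white_walkers : Prop := ∀ (village : String), Dom_white_walkers village → Spec_white_walkers village (white_walkers village)

-- ===== LEMMAS AND PROOFS =====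

-- digit test: the ten chained equalities are the range check '0' <= c <= '9'
theorem pv_dig_cond (c : Char) :
    pvIsDigA (some c) = (decide ('0' ≤ c) && decide (c ≤ '9')) := by
  have hext : ∀ d : Char, (c = d) ↔ (c.toNat = d.toNat) :=
    fun d => ⟨fun h => h ▸ rfl, fun h => Char.ext (UInt32.toNat_inj.mp h)⟩
  rw [Bool.eq_iff_iff]
  simp only [pvIsDigA, Bool.or_eq_true, beq_iff_eq, Option.some_inj, hext, Bool.and_eq_true,
    decide_eq_true_eq, Char.le_def, UInt32.le_iff_toNat_le]
  show ((((((((c.toNat = 48 ∨ c.toNat = 49) ∨ c.toNat = 50) ∨ c.toNat = 51) ∨ c.toNat = 52) ∨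
      c.toNat = 53) ∨ c.toNat = 54) ∨ c.toNat = 55) ∨ c.toNat = 56) ∨ c.toNat = 57 ↔
      48 ≤ c.toNat ∧ c.toNat ≤ 57
  omega

-- the nat positions of digit chars, in order
def pvP (cs : List Char) : List Nat :=
  (List.range cs.length).filter (fun i => decide ('0' ≤ cs.getD i ' ') && decide (cs.getD i ' ' ≤ '9'))

theorem pvP_mem_lt (cs : List Char) {i : Nat} (h : i ∈ pvP cs) : i < cs.length := by
  have := List.mem_filter.mp h
  exact List.mem_range.mp this.1

theorem pv_index_eq (cs : List Char) :
    (PySem.List.pyRange 0 (cs.length : Int)).foldl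
      (fun idx i => if pvIsDigA (PySem.List.pyGet? cs i) then idx ++ [i] else idx) [] =
    List.map (fun i : Nat => (i : Int)) (pvP cs) := by
  rw [PySem.List.foldl_append_if (fun i => pvIsDigA (PySem.List.pyGet? cs i)) (fun i => i),
    PySem.List.pyRange_zero_natCast, List.filter_map]
  simp only [List.nil_append, List.map_id_fun', id]
  unfold pvP
  have hf : List.filter ((fun i => pvIsDigA (PySem.List.pyGet? cs i)) ∘ fun k : Nat => (k : Int))
      (List.range cs.length)
      = List.filter (fun i => decide ('0' ≤ cs.getD i ' ') && decide (cs.getD i ' ' ≤ '9'))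
        (List.range cs.length) := by
    apply List.filter_congr
    intro i hi
    have hlt : i < cs.length := List.mem_range.mp hi
    simp only [Function.comp_apply, PySem.List.pyGet?_natCast, List.getElem?_eq_getElem hlt,
      pv_dig_cond, List.getD_eq_getElem cs ' ' hlt]
  rw [hf]

-- filterMap of an if-some comprehension is map over filter
theorem pv_filterMap_if_map {α β : Type} (q : α → Prop) [DecidablePred q] (g : α → β) (l : List α) :
    l.filterMap (fun x => if q x then some (g x) else none)
      = (l.filter (fun x => decide (q x))).map g := by
  induction l with
  | nil => rfl
  | cons a l ih =>
    by_cases h : q a <;> simp [List.filterMap_cons, List.filter_cons, h, ih]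

theorem pv_digits_eq (cs : List Char) :
    (PySem.List.enumerate cs).filterMap
      (fun p => if '0' ≤ p.2 ∧ p.2 ≤ '9' then some (p.1, (p.2.toNat : Int) - 48) else none) =
    List.map (fun i : Nat => (((i : Nat) : Int), ((cs.getD i ' ').toNat : Int) - 48)) (pvP cs) := by
  rw [PySem.List.enumerate_eq_map_pyRange cs ' ', List.filterMap_map]
  have hlen : PySem.List.len cs = (cs.length : Int) := rfl
  rw [hlen, PySem.List.pyRange_zero_natCast, List.filterMap_map]
  unfold pvP
  simp only [Function.comp_def, PySem.List.pyGetD_natCast]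
  rw [pv_filterMap_if_map (fun i : Nat => '0' ≤ cs.getD i ' ' ∧ cs.getD i ' ' ≤ '9')
    (fun i : Nat => (((i : Nat) : Int), ((cs.getD i ' ').toNat : Int) - 48))]
  simp only [Bool.decide_and]

-- prefix-sum fold characterisation
theorem pv_prefix_fold (cs : List Char) (p0 : List Int) (t0 : Int) :
    cs.foldl (fun (pt : List Int × Int) ch =>
        let t := pt.2 + (if ch == '=' then 1 else 0)
        (pt.1 ++ [t], t)) (p0, t0) =
      (p0 ++ (List.range cs.length).map (fun i => t0 + ((cs.take (i + 1)).count '=' : Int)),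
       t0 + (cs.count '=' : Int)) := by
  induction cs generalizing p0 t0 with
  | nil => simp
  | cons c cs ih =>
    simp only [List.foldl_cons, ih, List.length_cons, List.range_succ_eq_map, List.map_cons,
      List.map_map, List.count_cons]
    rw [Prod.mk.injEq]
    constructor
    · rw [List.append_assoc]
      congr 1
      rw [List.singleton_append]
      congr 1
      · by_cases hc : c = '=' <;> simp [hc]
      · congr 1
        funext i
        simp only [Function.comp_apply, List.take_succ_cons, List.count_cons]
        by_cases hc : c = '=' <;> simp [hc] <;> push_cast <;> ring
    · push_cast
      ring

theorem pv_prefix_get (cs : List Char) (p : Nat) (hp : p ≤ cs.length) :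
    (([0] ++ (List.range cs.length).map (fun i => 0 + ((cs.take (i + 1)).count '=' : Int)) : List Int)).getD p 0
      = ((cs.take p).count '=' : Int) := by
  cases p with
  | zero => simp
  | succ m =>
    have hm : m < cs.length := by omega
    simp [List.getD_eq_getElem?_getD, List.getElem?_map, List.getElem?_range, hm]

-- single-char substring count is char count
theorem pv_count_go_singleton (c : Char) (fuel : Nat) :
    ∀ (l : List Char) (acc : Nat), l.length ≤ fuel →
      PySem.Chars.count.go [c] fuel l acc = acc + l.count c := by
  induction fuel with
  | zero =>
    intro l acc h
    cases l with
    | nil => simp [PySem.Chars.count.go]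
    | cons a t => simp at h
  | succ fuel ih =>
    intro l acc h
    cases l with
    | nil => simp [PySem.Chars.count.go]
    | cons a t =>
      rw [PySem.Chars.count.go]
      by_cases hc : c = a
      · subst hc
        rw [if_pos (by simp [List.isPrefixOf])]
        have hd : List.drop ([c].length) (c :: t) = t := by simp
        simp only [List.length_cons] at h
        rw [hd, ih t (acc + 1) (by omega)]
        simp [List.count_cons]
        omega
      · rw [if_neg (by simp [List.isPrefixOf]; exact hc)]
        simp only [List.length_cons] at h
        rw [ih t acc (by omega)]
        simp [List.count_cons, Ne.symm hc, hc]

theorem pv_count_singleton (c : Char) (l : List Char) :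
    PySem.Chars.count l [c] = l.count c := by
  rw [PySem.Chars.count]
  rw [if_neg (by simp)]
  rw [pv_count_go_singleton c l.length l 0 le_rfl]
  omega

theorem pv_cntA_eq (cs : List Char) (a b : Nat) (hab : a ≤ b) (hb : b ≤ cs.length) :
    pvCntA cs (a : Int) (b : Int)
      = ((cs.take b).count '=' : Int) - ((cs.take a).count '=' : Int) := by
  unfold pvCntA
  rw [PySem.List.slice_natCast, pv_count_singleton]
  have hsplit : cs.take b = cs.take a ++ List.take (b - a) (List.drop a cs) := by
    rw [← List.take_add]
    congr 1
    omega
  rw [hsplit, List.count_append]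
  push_cast
  ring

theorem pv_digA_eq (cs : List Char) (i : Nat) (hi : i ∈ pvP cs) :
    pvDigA cs (i : Int) = ((cs.getD i ' ').toNat : Int) - 48 := by
  have hlt := pvP_mem_lt cs hi
  have hq := (List.mem_filter.mp hi).2
  unfold pvDigA
  rw [PySem.List.pyGet?_natCast, List.getElem?_eq_getElem hlt]
  rw [show cs[i] = cs.getD i ' ' from (List.getD_eq_getElem cs ' ' hlt).symm]
  set c := cs.getD i ' ' with hc
  simp only [Bool.and_eq_true, decide_eq_true_eq, Char.le_def, UInt32.le_iff_toNat_le] at hq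
  have h48 : 48 ≤ c.toNat ∧ c.toNat ≤ 57 := hq
  have h10 : c.toNat = 48 ∨ c.toNat = 49 ∨ c.toNat = 50 ∨ c.toNat = 51 ∨ c.toNat = 52 ∨
      c.toNat = 53 ∨ c.toNat = 54 ∨ c.toNat = 55 ∨ c.toNat = 56 ∨ c.toNat = 57 := by omega
  rcases h10 with h|h|h|h|h|h|h|h|h|h
  · have hce : c = '0' := Char.ext (UInt32.toNat_inj.mp h)
    rw [hce]
    decide
  · have hce : c = '1' := Char.ext (UInt32.toNat_inj.mp h)
    rw [hce]
    decide
  · have hce : c = '2' := Char.ext (UInt32.toNat_inj.mp h)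
    rw [hce]
    decide
  · have hce : c = '3' := Char.ext (UInt32.toNat_inj.mp h)
    rw [hce]
    decide
  · have hce : c = '4' := Char.ext (UInt32.toNat_inj.mp h)
    rw [hce]
    decide
  · have hce : c = '5' := Char.ext (UInt32.toNat_inj.mp h)
    rw [hce]
    decide
  · have hce : c = '6' := Char.ext (UInt32.toNat_inj.mp h)
    rw [hce]
    decide
  · have hce : c = '7' := Char.ext (UInt32.toNat_inj.mp h)
    rw [hce]
    decide
  · have hce : c = '8' := Char.ext (UInt32.toNat_inj.mp h)
    rw [hce]
    decide
  · have hce : c = '9' := Char.ext (UInt32.toNat_inj.mp h)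
    rw [hce]
    decide

-- the condition under which the pair (jn, xn) of digit-position indices makes A record False
def pvBad (cs : List Char) (jn xn : Nat) : Prop :=
  ((cs.take ((pvP cs).getD xn 0)).count '=' - (cs.take ((pvP cs).getD jn 0)).count '=') % 3 = 0 ∧
      (pvP cs).length = 2 ∨
    ¬ ((cs.take ((pvP cs).getD xn 0)).count '=' - (cs.take ((pvP cs).getD jn 0)).count '=') % 3 = 0 ∧
      (((cs.getD ((pvP cs).getD jn 0) ' ').toNat : Int) - 48) +
        (((cs.getD ((pvP cs).getD xn 0) ' ').toNat : Int) - 48) = 10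

-- Bool form of pvBad (no instance declarations are allowed, so spell the decide out)
def pvBadB (cs : List Char) (jn xn : Nat) : Bool :=
  (decide
      (((cs.take ((pvP cs).getD xn 0)).count '=' - (cs.take ((pvP cs).getD jn 0)).count '=') % 3 = 0) &&
    decide ((pvP cs).length = 2)) ||
  (!decide
      (((cs.take ((pvP cs).getD xn 0)).count '=' - (cs.take ((pvP cs).getD jn 0)).count '=') % 3 = 0) &&
    decide ((((cs.getD ((pvP cs).getD jn 0) ' ').toNat : Int) - 48) +
        (((cs.getD ((pvP cs).getD xn 0) ' ').toNat : Int) - 48) = 10))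

theorem pvBadB_iff (cs : List Char) (jn xn : Nat) : pvBadB cs jn xn = true ↔ pvBad cs jn xn := by
  unfold pvBadB pvBad
  simp

theorem pv_pairwise (cs : List Char) : (pvP cs).Pairwise (· < ·) := by
  exact List.Pairwise.filter _ List.pairwise_lt_range

theorem pv_take_count_le (cs : List Char) {a b : Nat} (hab : a ≤ b) :
    (cs.take a).count '=' ≤ (cs.take b).count '=' := by
  have : cs.take b = cs.take a ++ List.take (b - a) (List.drop a cs) := by
    rw [← List.take_add]
    congr 1
    omega
  rw [this, List.count_append]
  omega

-- A's count for the pair, as the difference of prefix counts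
theorem pv_cntA_pair (cs : List Char) {a b : Nat} (hab : a ≤ b) (hb : b ≤ cs.length) :
    pvCntA cs (a : Int) (b : Int)
      = (((cs.take b).count '=' - (cs.take a).count '=' : Nat) : Int) := by
  rw [pv_cntA_eq cs a b hab hb]
  have := pv_take_count_le cs hab
  omega

theorem pv_body_false (cs : List Char) (jn xn : Nat) (hjx : jn < xn)
    (hxk : xn < (pvP cs).length) :
    (false ∈ pvBodyA cs (List.map (fun i : Nat => (i : Int)) (pvP cs)) (jn : Int) (xn : Int))
      ↔ pvBad cs jn xn := by
  have hjk : jn < (pvP cs).length := lt_trans hjx hxk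
  have ha : (pvP cs).getD jn 0 = (pvP cs)[jn] := List.getD_eq_getElem _ _ hjk
  have hb : (pvP cs).getD xn 0 = (pvP cs)[xn] := List.getD_eq_getElem _ _ hxk
  have hab : (pvP cs)[jn] < (pvP cs)[xn] :=
    (List.pairwise_iff_getElem.mp (pv_pairwise cs)) jn xn hjk hxk hjx
  have hamem : (pvP cs)[jn] ∈ pvP cs := List.getElem_mem _
  have hbmem : (pvP cs)[xn] ∈ pvP cs := List.getElem_mem _
  have hblen : (pvP cs)[xn] < cs.length := pvP_mem_lt cs hbmem
  have hga : PySem.List.pyGetD (List.map (fun i : Nat => (i : Int)) (pvP cs)) (jn : Int) 0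
      = ((pvP cs)[jn] : Int) := by
    rw [PySem.List.pyGetD_natCast, List.getD_eq_getElem _ _ (by simpa using hjk),
      List.getElem_map]
  have hgb : PySem.List.pyGetD (List.map (fun i : Nat => (i : Int)) (pvP cs)) (xn : Int) 0
      = ((pvP cs)[xn] : Int) := by
    rw [PySem.List.pyGetD_natCast, List.getD_eq_getElem _ _ (by simpa using hxk),
      List.getElem_map]
  simp only [pvBodyA]
  rw [if_neg (by simp; omega)]
  simp only [hga, hgb]
  rw [pv_cntA_pair cs (le_of_lt hab) (le_of_lt hblen)]
  rw [pv_digA_eq cs _ hamem, pv_digA_eq cs _ hbmem]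
  unfold pvBad
  rw [ha, hb]
  set m := (cs.take (pvP cs)[xn]).count '=' - (cs.take (pvP cs)[jn]).count '=' with hm
  set s := (((cs.getD (pvP cs)[jn] ' ').toNat : Int) - 48) +
      (((cs.getD (pvP cs)[xn] ' ').toNat : Int) - 48) with hs
  clear_value m s
  have hmod : PySem.Int.mod (m : Int) 3 = ((m % 3 : Nat) : Int) := PySem.Int.mod_natCast m 3
  have h3 : (m : Int) = 3 → m % 3 = 0 := by
    intro h
    omega
  have hcast3 : ((m : Int) == (3 : Int)) = decide (m = 3) := by
    by_cases h : m = 3 <;> simp [h]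
    omega
  have hz : ((((m % 3 : Nat) : Int)) == 0) = decide (m % 3 = 0) := by
    by_cases h : m % 3 = 0 <;> simp [h]
    omega
  have hk2e : ((pvP cs).length == 2) = decide ((pvP cs).length = 2) := by
    by_cases h : (pvP cs).length = 2 <;> simp [h]
  have hs10e : (s == (10 : Int)) = decide (s = 10) := by
    by_cases h : s = 10 <;> simp [h]
  simp only [hmod, List.length_map, bne, hz, hk2e, hs10e, hcast3]
  by_cases h0 : m % 3 = 0 <;> by_cases hk2 : (pvP cs).length = 2 <;>
    by_cases hs10 : s = 10 <;> by_cases hm3 : m = 3 <;>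
    simp only [h0, hk2, hs10, hm3, decide_true, decide_false, Bool.and_true, Bool.and_false,
      Bool.true_and, Bool.false_and, Bool.or_true, Bool.or_false, Bool.true_or, Bool.false_or,
      Bool.not_true, Bool.not_false, if_true, if_false, List.mem_singleton, List.mem_cons,
      List.not_mem_nil] <;>
    first
    | tauto
    | simp_all

-- B's inner test for the pair (jn, xn) decides exactly pvBad
theorem pv_alt_inner (cs : List Char) (jn xn : Nat) (hjx : jn < xn)
    (hxk : xn < (pvP cs).length) :
    (if (PySem.Int.mod
          (PySem.List.pyGetD
              ([0] ++ List.map (fun i => 0 + ((List.count '=' (List.take (i + 1) cs) : Nat) : Int))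
                (List.range cs.length))
              (PySem.List.pyGetD
                (List.map (fun i : Nat => (((i : Nat) : Int), ((cs.getD i ' ').toNat : Int) - 48)) (pvP cs))
                (xn : Int) (0, 0)).1 0 -
            PySem.List.pyGetD
              ([0] ++ List.map (fun i => 0 + ((List.count '=' (List.take (i + 1) cs) : Nat) : Int))
                (List.range cs.length))
              (PySem.List.pyGetD
                (List.map (fun i : Nat => (((i : Nat) : Int), ((cs.getD i ' ').toNat : Int) - 48)) (pvP cs))
                (jn : Int) (0, 0)).1 0)
          3 == 0) = true
     then (pvP cs).length == 2
     else
       decide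
         ((PySem.List.pyGetD
              (List.map (fun i : Nat => (((i : Nat) : Int), ((cs.getD i ' ').toNat : Int) - 48)) (pvP cs))
              (jn : Int) (0, 0)).2 +
            (PySem.List.pyGetD
              (List.map (fun i : Nat => (((i : Nat) : Int), ((cs.getD i ' ').toNat : Int) - 48)) (pvP cs))
              (xn : Int) (0, 0)).2 = 10))
      = pvBadB cs jn xn := by
  have hjk : jn < (pvP cs).length := lt_trans hjx hxk
  have ha : (pvP cs).getD jn 0 = (pvP cs)[jn] := List.getD_eq_getElem _ _ hjk
  have hb : (pvP cs).getD xn 0 = (pvP cs)[xn] := List.getD_eq_getElem _ _ hxk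
  have hab : (pvP cs)[jn] < (pvP cs)[xn] :=
    (List.pairwise_iff_getElem.mp (pv_pairwise cs)) jn xn hjk hxk hjx
  have hbmem : (pvP cs)[xn] ∈ pvP cs := List.getElem_mem _
  have hblen : (pvP cs)[xn] < cs.length := pvP_mem_lt cs hbmem
  have hamem : (pvP cs)[jn] ∈ pvP cs := List.getElem_mem _
  have halen : (pvP cs)[jn] < cs.length := pvP_mem_lt cs hamem
  have hgd : ∀ (n : Nat) (hn : n < (pvP cs).length),
      PySem.List.pyGetD
          (List.map (fun i : Nat => (((i : Nat) : Int), ((cs.getD i ' ').toNat : Int) - 48)) (pvP cs))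
          (n : Int) (0, 0)
        = ((((pvP cs)[n]'(by omega) : Nat) : Int), ((cs.getD ((pvP cs)[n]'(by omega)) ' ').toNat : Int) - 48) := by
    intro n hn
    rw [PySem.List.pyGetD_natCast, List.getD_eq_getElem _ _ (by simpa using hn), List.getElem_map]
  have hpfx : ∀ (p : Nat), p ≤ cs.length →
      PySem.List.pyGetD
          ([0] ++ List.map (fun i => 0 + ((List.count '=' (List.take (i + 1) cs) : Nat) : Int))
            (List.range cs.length))
          ((p : Nat) : Int) 0
        = ((cs.take p).count '=' : Int) := by
    intro p hp
    rw [PySem.List.pyGetD_natCast]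
    exact pv_prefix_get cs p hp
  rw [hgd jn hjk, hgd xn hxk]
  simp only
  rw [hpfx _ (le_of_lt halen), hpfx _ (le_of_lt hblen)]
  unfold pvBadB
  rw [ha, hb]
  have hle := pv_take_count_le cs (le_of_lt hab)
  rw [show ((cs.take (pvP cs)[xn]).count '=' : Int) - ((cs.take (pvP cs)[jn]).count '=' : Int)
      = (((cs.take (pvP cs)[xn]).count '=' - (cs.take (pvP cs)[jn]).count '=' : Nat) : Int) by omega]
  set m := (cs.take (pvP cs)[xn]).count '=' - (cs.take (pvP cs)[jn]).count '=' with hm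
  set s := (((cs.getD (pvP cs)[jn] ' ').toNat : Int) - 48) +
      (((cs.getD (pvP cs)[xn] ' ').toNat : Int) - 48) with hs
  clear_value m s
  have hmod : PySem.Int.mod (m : Int) 3 = ((m % 3 : Nat) : Int) := PySem.Int.mod_natCast m 3
  have hz : ((((m % 3 : Nat) : Int)) == 0) = decide (m % 3 = 0) := by
    by_cases h : m % 3 = 0 <;> simp [h]
    omega
  have hk2e : ((pvP cs).length == 2) = decide ((pvP cs).length = 2) := by
    by_cases h : (pvP cs).length = 2 <;> simp [h]
  simp only [hmod, hz, hk2e]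
  by_cases h0 : m % 3 = 0 <;> by_cases hk2 : (pvP cs).length = 2 <;>
    by_cases hs10 : s = 10 <;>
    simp [h0, hk2, hs10]

theorem pv_glue {c b : Bool} (h : c = true ↔ b = false) :
    (if c = true then false else true) = b := by
  cases c <;> cases b <;> simp_all

theorem white_walkers_spec' (village : String) :
    white_walkers village = white_walkers_alt village := by
  unfold white_walkers white_walkers_alt
  simp only [pv_index_eq, pv_digits_eq, List.length_map]
  set cs := village.toList with hcs
  by_cases hk : (pvP cs).length ≤ 1
  · simp [hk]
  · rw [if_neg hk, if_neg hk]
    rw [pv_prefix_fold]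
    simp only [PySem.List.foldl_append_eq_flatMap, List.nil_append]
    apply pv_glue
    rw [List.contains_iff_mem]
    simp only [List.mem_flatMap, PySem.List.mem_pyRange_one]
    constructor
    · rintro ⟨j, ⟨hj0, hjk⟩, x, ⟨hjx, hxk⟩, hbody⟩
      obtain ⟨jn, rfl⟩ := Int.eq_ofNat_of_zero_le hj0
      obtain ⟨xn, rfl⟩ := Int.eq_ofNat_of_zero_le (le_trans hj0 hjx)
      have hxn : xn < (pvP cs).length := by exact_mod_cast hxk
      have hjxn : jn ≤ xn := by exact_mod_cast hjx
      rcases Nat.lt_or_ge jn xn with hlt | hge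
      · have hbad := (pv_body_false cs jn xn hlt hxn).mp hbody
        by_contra hne
        rw [Bool.not_eq_false, List.all_eq_true] at hne
        have h1 := hne (jn : Int) (by
          rw [PySem.List.mem_pyRange_one]
          constructor
          · exact Int.natCast_nonneg jn
          · exact_mod_cast lt_trans hlt hxn)
        simp only at h1
        rw [List.all_eq_true] at h1
        have h2 := h1 (xn : Int) (by
          rw [PySem.List.mem_pyRange_one]
          constructor
          · exact_mod_cast hlt
          · exact_mod_cast hxn)
        simp only at h2
        rw [pv_alt_inner cs jn xn hlt hxn, Bool.not_eq_eq_eq_not] at h2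
        rw [← pvBadB_iff cs jn xn] at hbad
        simp [hbad] at h2
      · have : jn = xn := le_antisymm hjxn hge
        subst this
        exfalso
        simp [pvBodyA] at hbody
    · intro hfalse
      by_contra hne
      rw [← Bool.not_eq_true] at hfalse
      apply hfalse
      rw [List.all_eq_true]
      intro j hj
      rw [PySem.List.mem_pyRange_one] at hj
      obtain ⟨jn, rfl⟩ := Int.eq_ofNat_of_zero_le hj.1
      rw [List.all_eq_true]
      intro x hx
      rw [PySem.List.mem_pyRange_one] at hx
      obtain ⟨xn, rfl⟩ := Int.eq_ofNat_of_zero_le (by omega : (0 : Int) ≤ x)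
      have hlt : jn < xn := by omega
      have hxn : xn < (pvP cs).length := by exact_mod_cast hx.2
      rw [pv_alt_inner cs jn xn hlt hxn]
      cases hpb : pvBadB cs jn xn with
      | false => rfl
      | true =>
        have hb := (pvBadB_iff cs jn xn).mp hpb
        exact (hne ⟨(jn : Int), ⟨by omega, by omega⟩, (xn : Int), ⟨by omega, by omega⟩,
          (pv_body_false cs jn xn hlt hxn).mpr hb⟩).elim

-- ===== VERDICT (by name: the statement is the Claim_ definition above) =====
theorem white_walkers_spec : Claim_equal_white_walkers := by
  intro v _
  exact white_walkers_spec' v
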